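-- pv_equiv track=rewrite | github.com/IwoSzczepaniak/Wakacje_z_ASD | p3b - mst kruskal/egzP3b.py | lufthansa
-- ===== SOURCE A (Python) =====
-- class Node:
--     def __init__(self, value):
--         self.parent = self
--         self.value = value
--         self.rank = 0
--
-- def find(x):
--     if x.parent != x:
--         x.parent = find(x.parent)
--     return x.parent
--
-- def union(x, y):
--     x = find(x)
--     y = find(y)
--     if x == y: return
--     if x.rank > y.rank:
--         y.parent = x
--     else:
--         x.parent = y
--         if x.rank == y.rank:
--             y.rank += 1
--
-- def lufthansa ( G ):
--     n = len(G)
--     mass = 0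
--     K = []
--     vertex = []
--     for i in range(n):
--         vertex.append(Node(i))
--         for j in range(len(G[i])):
--             if i < G[i][j][0]:
--                 mass += G[i][j][1]
--                 K.append((i, G[i][j][0], -G[i][j][1]))
--     K.sort(key = lambda x:x[2])
--
--     result = []
--     # i = 0
--     for j in range(len(K)):
--         (fromm, to, cost) = K[j]
--         source = find(vertex[fromm])
--         sink = find(vertex[to])
--         if sink != source:
--             result.append((fromm, to, cost))
--             union(sink, source)
--             # i += 1
--             # if i == n-1: # niby przyspiesza, w rzeczywistości się nie opłaca
--             #     break
--
--     for j in range(len(K)):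
--         if K[j] not in result:
--             (fromm, to, cost) = K[j]
--             result.append((fromm, to, cost))
--             break
--
--     summ = 0
--     for i in range(len(result)):
--         summ -= result[i][2]
--     return mass - summ
-- ===== SOURCE B (Python) =====
-- def lufthansa(G):
--     n = len(G)
--     mass = 0
--     edges = []
--     for i, adj in enumerate(G):
--         for (to, w) in adj:
--             if i < to:
--                 mass += w
--                 edges.append((i, to, -w))
--     edges.sort(key=lambda e: e[2])
--     comp = list(range(n))
--     taken = []
--     skipped = []
--     for e in edges:
--         a = comp[e[0]]
--         b = comp[e[1]]
--         if a != b: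
--             comp = [a if c == b else c for c in comp]
--             taken.append(e)
--         else:
--             skipped.append(e)
--     summ = 0
--     for (_, _, c) in taken:
--         summ -= c
--     for e in skipped:
--         if e not in taken:
--             summ -= e[2]
--             break
--     return mass - summ
-- ===== Notes on version B (the rewrite author's own statement) =====
-- stated objective: simpler
-- what changed: Replaces A's Node-object union-find (recursive find with path compression, union by rank) by a Kruskal scan over a flat list of component labels that is remapped on each merge, with the edge build done by direct iteration instead of index arithmetic; no classes and no recursion remain.
import Mathlib
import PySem

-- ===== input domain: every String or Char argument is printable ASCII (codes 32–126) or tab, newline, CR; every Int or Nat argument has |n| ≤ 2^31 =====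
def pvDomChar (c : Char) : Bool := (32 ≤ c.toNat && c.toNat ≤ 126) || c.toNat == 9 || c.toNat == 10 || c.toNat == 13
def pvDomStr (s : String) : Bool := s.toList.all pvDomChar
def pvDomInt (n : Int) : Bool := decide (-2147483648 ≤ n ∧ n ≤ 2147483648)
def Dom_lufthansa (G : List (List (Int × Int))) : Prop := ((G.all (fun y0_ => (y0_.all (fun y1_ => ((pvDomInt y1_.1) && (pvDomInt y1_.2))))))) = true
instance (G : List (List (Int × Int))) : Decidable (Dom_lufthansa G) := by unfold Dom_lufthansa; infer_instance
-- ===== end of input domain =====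

-- B replaces A's union-find (Node objects, path compression, ranks) by Kruskal over a flat
-- component-label list that is remapped on each merge: simpler (no classes, no recursion), same results.

-- ===== PORT A =====
-- find(x) with path compression; the recursion is made structural with a fuel counter
-- (fuel n + |K| always suffices, see rootD lemmas below); Nodes are their indices, parents a list.
def pyFind : Nat → List Nat → Nat → List Nat × Nat
  | 0, p, x => (p, x)
  | k+1, p, x =>
    let px := p.getD x x
    if px = x then (p, x)
    else
      let pr := pyFind k p px
      (pr.1.set x pr.2, pr.2)

-- union(x, y) with union by rank, exactly A's branch order
def pyUnion (k : Nat) (p : List Nat) (rk : List Int) (x y : Nat) : List Nat × List Int :=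
  let fx := pyFind k p x
  let fy := pyFind k fx.1 y
  let x' := fx.2
  let y' := fy.2
  let p2 := fy.1
  if x' = y' then (p2, rk)
  else if rk.getD y' 0 < rk.getD x' 0 then (p2.set y' x', rk)
  else
    (p2.set x' y', if rk.getD x' 0 = rk.getD y' 0 then rk.set y' (rk.getD y' 0 + 1) else rk)

-- A's Kruskal loop over the sorted edge list K (state: parents, ranks, result).
-- e.1, e.2.1 are ≥ 0 by construction; e.2.1 < n is Pre_lufthansa (Python raises IndexError otherwise).
def kruskalA (fuel : Nat) : List (Int × Int × Int) → List Nat → List Int → List (Int × Int × Int) → List (Int × Int × Int)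
  | [], _, _, res => res
  | e :: es, p, rk, res =>
    let ff := pyFind fuel p e.1.toNat
    let ft := pyFind fuel ff.1 e.2.1.toNat
    if ft.2 ≠ ff.2 then
      let u := pyUnion fuel ft.1 rk ft.2 ff.2
      kruskalA fuel es u.1 u.2 (res ++ [e])
    else
      kruskalA fuel es ft.1 rk res

def lufthansa (G : List (List (Int × Int))) : Int :=
  let n := G.length
  let mk := (PySem.List.pyRange 0 (n : Int) 1).foldl
    (fun acc i =>
      let row := PySem.List.pyGetD G i []
      (PySem.List.pyRange 0 (row.length : Int) 1).foldl
        (fun acc2 j =>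
          let e := PySem.List.pyGetD row j (0, 0)
          if i < e.1 then (acc2.1 + e.2, acc2.2 ++ [(i, e.1, -e.2)]) else acc2) acc)
    ((0 : Int), ([] : List (Int × Int × Int)))
  let K := PySem.List.sorted mk.2 (fun x => x.2.2) false
  let res := kruskalA (n + K.length) K (List.range n) (List.replicate n (0 : Int)) []
  let res2 := (K.find? (fun e => !(res.contains e))).elim res (fun e => res ++ [e])
  mk.1 - res2.foldl (fun s e => s - e.2.2) (0 : Int)

-- ===== PORT B =====
-- one Kruskal step on (component labels, taken, skipped)
def altStep (st : List Int × List (Int × Int × Int) × List (Int × Int × Int)) (e : Int × Int × Int) :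
    List Int × List (Int × Int × Int) × List (Int × Int × Int) :=
  if st.1.getD e.1.toNat 0 ≠ st.1.getD e.2.1.toNat 0 then
    (st.1.map (fun c => if c = st.1.getD e.2.1.toNat 0 then st.1.getD e.1.toNat 0 else c),
      st.2.1 ++ [e], st.2.2)
  else (st.1, st.2.1, st.2.2 ++ [e])

def lufthansa_alt (G : List (List (Int × Int))) : Int :=
  let n := G.length
  let mk := (PySem.List.enumerate G 0).foldl
    (fun acc ia => ia.2.foldl
      (fun acc2 tw => if ia.1 < tw.1 then (acc2.1 + tw.2, acc2.2 ++ [(ia.1, tw.1, -tw.2)]) else acc2) acc)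
    ((0 : Int), ([] : List (Int × Int × Int)))
  let edges := PySem.List.sorted mk.2 (fun x => x.2.2) false
  let st := edges.foldl altStep ((List.range n).map (fun (v : Nat) => (v : Int)),
    ([] : List (Int × Int × Int)), ([] : List (Int × Int × Int)))
  let summ1 := st.2.1.foldl (fun s e => s - e.2.2) (0 : Int)
  let summ := (st.2.2.find? (fun e => !(st.2.1.contains e))).elim summ1 (fun e => summ1 - e.2.2)
  mk.1 - summ

-- ===== PRECONDITION & SPEC =====
-- Pre_ excludes exactly the inputs where Python A raises IndexError: a neighbour entry (t, w)
-- in row i with i < t but t ≥ len(G) (A indexes vertex[t]).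
def Pre_lufthansa (G : List (List (Int × Int))) : Prop :=
  ∀ p ∈ PySem.List.enumerate G 0, ∀ e ∈ p.2, p.1 < e.1 → e.1 < (G.length : Int)
instance (G : List (List (Int × Int))) : Decidable (Pre_lufthansa G) := by
  unfold Pre_lufthansa; infer_instance

def pvWitness_lufthansa : List (List (Int × Int)) := [[(1, 5), (2, 3)], [(0, 5), (2, 4)], [(0, 3), (1, 4)]]

def Spec_lufthansa (G : List (List (Int × Int))) (out : Int) : Prop := out = lufthansa_alt G
instance (G : List (List (Int × Int))) (out : Int) : Decidable (Spec_lufthansa G out) := by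
  unfold Spec_lufthansa; infer_instance

-- ===== CLAIM (what is proved, stated in full; the proofs are below) =====
def Claim_equal_lufthansa : Prop := ∀ (G : List (List (Int × Int))), Dom_lufthansa G → Pre_lufthansa G → Spec_lufthansa G (lufthansa G)

-- ===== LEMMAS AND PROOFS =====

-- root of x in parent list p, chasing at most `fuel` steps (none = fuel exhausted)
def rootD : Nat → List Nat → Nat → Option Nat
  | 0, _, _ => none
  | k+1, p, x => if p.getD x x = x then some x else rootD k p (p.getD x x)

theorem pyFind_root {k : Nat} {p : List Nat} {x : Nat} (h : p.getD x x = x) :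
    pyFind k p x = (p, x) := by
  cases k with
  | zero => rfl
  | succ k => rw [pyFind]; simp only [h, if_pos]

theorem rootD_mono : ∀ {k k' : Nat} {p : List Nat} {x r : Nat},
    rootD k p x = some r → k ≤ k' → rootD k' p x = some r := by
  intro k k' p x r h hk
  induction k generalizing k' x with
  | zero => simp [rootD] at h
  | succ k ih =>
    obtain ⟨k'', rfl⟩ : ∃ j, k' = j + 1 := ⟨k' - 1, by omega⟩
    rw [rootD] at h ⊢
    by_cases hc : p.getD x x = x
    · rwa [if_pos hc] at h ⊢
    · rw [if_neg hc] at h ⊢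
      exact ih h (by omega)

theorem rootD_isRoot : ∀ {k : Nat} {p : List Nat} {x r : Nat},
    rootD k p x = some r → p.getD r r = r := by
  intro k p x r h
  induction k generalizing x with
  | zero => simp [rootD] at h
  | succ k ih =>
    rw [rootD] at h
    by_cases hc : p.getD x x = x
    · rw [if_pos hc] at h; cases h; exact hc
    · rw [if_neg hc] at h; exact ih h

theorem rootD_unique : ∀ {k k' : Nat} {p : List Nat} {x r r' : Nat},
    rootD k p x = some r → rootD k' p x = some r' → r = r' := by
  intro k k' p x r r' h h'
  have h1 := rootD_mono h (Nat.le_max_left k k')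
  have h2 := rootD_mono h' (Nat.le_max_right k k')
  rw [h1] at h2; cases h2; rfl

theorem rootD_lt : ∀ {k : Nat} {p : List Nat} {x r : Nat},
    rootD k p x = some r → x < p.length → (∀ v, v < p.length → p.getD v v < p.length) →
    r < p.length := by
  intro k p x r h hx hb
  induction k generalizing x with
  | zero => simp [rootD] at h
  | succ k ih =>
    rw [rootD] at h
    by_cases hc : p.getD x x = x
    · rw [if_pos hc] at h; cases h; exact hx
    · rw [if_neg hc] at h; exact ih h (hb x hx)

theorem rootD_set_preserve {p : List Nat} {x r m : Nat} (hr : rootD m p x = some r) :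
    ∀ {k u w : Nat}, rootD k p u = some w → rootD k (p.set x r) u = some w := by
  intro k u w h
  induction k generalizing u with
  | zero => simp [rootD] at h
  | succ k ih =>
    rw [rootD] at h ⊢
    by_cases hux : u = x
    · subst hux
      have h0 : rootD (k+1) p u = some w := by rw [rootD]; exact h
      have hw : w = r := rootD_unique h0 hr
      subst hw
      by_cases hlen : u < p.length
      · have hget : (p.set u w).getD u u = w := by
          simp [List.getD, hlen]
        by_cases hc : p.getD u u = u
        · -- u is its own root, so w = u; set is the identity on values
          rw [if_pos hc] at h; cases h
          rw [if_pos hget]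
        · rw [if_neg hc] at h
          have hroot : p.getD w w = w := rootD_isRoot hr
          have hwu : w ≠ u := by
            intro e; subst e; exact hc hroot
          rw [hget, if_neg hwu]
          -- goal: rootD k (p.set u w) w = some w ; w is a root of the set-list
          have : (p.set u w).getD w w = w := by
            rcases Nat.lt_or_ge w p.length with hlw | hlw
            · simpa [List.getD, hlw, List.getElem_set_ne (by omega : u ≠ w)] using hroot
            · simp [List.getD, List.getElem?_eq_none (by simpa using hlw : (p.set u w).length ≤ w)]
          -- need k ≥ 1: since p.getD u u ≠ u, rootD (k+1) p u recursed, so k ≥ 1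
          cases k with
          | zero => simp [rootD] at h
          | succ k' => rw [rootD, if_pos this]
      · -- x=u out of range: set is a no-op list, and getD u u = u so w = u
        have hset : p.set u w = p := List.set_eq_of_length_le (by omega)
        rw [hset]
        by_cases hc : p.getD u u = u
        · rwa [if_pos hc] at h ⊢
        · exfalso
          exact hc (by simp [List.getD, List.getElem?_eq_none (by omega : p.length ≤ u)])
    · have hgu : (p.set x r).getD u u = p.getD u u := by
        rcases Nat.lt_or_ge u p.length with hlu | hlu
        · simp [List.getD, hlu, List.getElem_set_ne (fun e => hux e.symm)]
        · simp [List.getD, List.getElem?_eq_none (by simpa using hlu : (p.set x r).length ≤ u),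
            List.getElem?_eq_none (by omega : p.length ≤ u)]
      rw [hgu]
      by_cases hc : p.getD u u = u
      · rwa [if_pos hc] at h ⊢
      · rw [if_neg hc] at h ⊢
        exact ih h

theorem pyFind_spec : ∀ (k : Nat) (p : List Nat) (x r : Nat), rootD k p x = some r →
    (pyFind k p x).2 = r ∧
    (∀ j u w, rootD j p u = some w → rootD j (pyFind k p x).1 u = some w) ∧
    (pyFind k p x).1.length = p.length ∧
    ((∀ v, v < p.length → p.getD v v < p.length) →
      ∀ v, v < p.length → (pyFind k p x).1.getD v v < p.length) := by
  intro k
  induction k with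
  | zero => intro p x r h; simp [rootD] at h
  | succ k ih =>
    intro p x r h
    rw [rootD] at h
    by_cases hc : p.getD x x = x
    · rw [if_pos hc] at h; cases h
      rw [pyFind_root hc]
      exact ⟨rfl, fun j u w hw => hw, rfl, fun hb => hb⟩
    · rw [if_neg hc] at h
      obtain ⟨h2, hpres, hlen, hbnd⟩ := ih p (p.getD x x) r h
      have heq : pyFind (k+1) p x = ((pyFind k p (p.getD x x)).1.set x r, r) := by
        rw [pyFind]; simp only [if_neg hc, h2]
      refine ⟨by rw [heq], ?_, ?_, ?_⟩
      · intro j u w hw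
        have hx1 : rootD (k+1) (pyFind k p (p.getD x x)).1 x = some r := by
          apply hpres; rw [rootD, if_neg hc]; exact h
        rw [heq]
        exact rootD_set_preserve hx1 (hpres j u w hw)
      · rw [heq]; simp only [List.length_set]; exact hlen
      · intro hb v hv
        rw [heq]
        have hb1 := hbnd hb
        have hxlen : x < p.length := by
          by_contra hxl
          exact hc (by simp [List.getD, List.getElem?_eq_none (by omega : p.length ≤ x)])
        have hrlt : r < p.length := rootD_lt (k := k+1) (by rw [rootD, if_neg hc]; exact h) hxlen hb
        have hx1 : x < (pyFind k p (p.getD x x)).1.length := by rw [hlen]; exact hxlen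
        by_cases hvx : v = x
        · subst hvx
          have : ((pyFind k p (p.getD v v)).1.set v r).getD v v = r := by
            rw [List.getD, List.getElem?_set_self]
            · rfl
            · exact hx1
          rw [this]; exact hrlt
        · have : ((pyFind k p (p.getD x x)).1.set x r).getD v v
              = (pyFind k p (p.getD x x)).1.getD v v := by
            rw [List.getD, List.getElem?_set_ne (fun e => hvx (Eq.symm e))]; rfl
          rw [this]; exact hb1 v hv
theorem getD_set_ne' (p : List Nat) (a b v : Nat) (hva : v ≠ a) :
    (p.set a b).getD v v = p.getD v v := by
  rcases Nat.lt_or_ge v p.length with hlv | hlv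
  · rw [List.getD, List.getElem?_set_ne (fun e => hva (Eq.symm e))]; rfl
  · rw [List.getD, List.getElem?_eq_none (by simpa using hlv : (p.set a b).length ≤ v),
      List.getD, List.getElem?_eq_none (by omega : p.length ≤ v)]

theorem rootD_link {p : List Nat} {a b : Nat} (ha : p.getD a a = a) (hb : p.getD b b = b)
    (hab : a ≠ b) (hlen : a < p.length) :
    ∀ {k u w : Nat}, rootD k p u = some w →
      rootD (k+1) (p.set a b) u = some (if w = a then b else w) := by
  intro k
  induction k with
  | zero => intro u w h; simp [rootD] at h
  | succ k ih =>
    intro u w h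
    rw [rootD] at h
    have hgb : (p.set a b).getD b b = b := by rw [getD_set_ne' p a b b (fun e => hab (Eq.symm e))]; exact hb
    by_cases hc : p.getD u u = u
    · rw [if_pos hc] at h; cases h
      by_cases hua : u = a
      · subst hua
        have hga : (p.set u b).getD u u = b := by
          rw [List.getD, List.getElem?_set_self]
          · rfl
          · exact hlen
        rw [rootD, hga, if_neg (fun e => hab (Eq.symm e)), if_pos rfl]
        cases k with
        | zero => rw [rootD, hgb, if_pos rfl]
        | succ k' => rw [rootD, hgb, if_pos rfl]
      · rw [rootD, getD_set_ne' p a b u hua, if_pos hc, if_neg hua]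
    · rw [if_neg hc] at h
      have hua : u ≠ a := fun e => hc (e ▸ ha)
      rw [rootD, getD_set_ne' p a b u hua, if_neg hc]
      exact ih h

-- the coupling invariant between A's parent list and B's label list
def KInv (n m : Nat) (p : List Nat) (comp : List Int) : Prop :=
  p.length = n ∧ comp.length = n ∧
  (∀ v, v < n → p.getD v v < n) ∧
  (∀ v, v < n → ∃ r, rootD m p v = some r) ∧
  (∀ u v ru rv, u < n → v < n → rootD m p u = some ru → rootD m p v = some rv →
    (ru = rv ↔ comp.getD u 0 = comp.getD v 0))

-- B's pure selection function: (taken, skipped) of the remaining edges from labels comp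
def selB : List (Int × Int × Int) → List Int → List (Int × Int × Int) × List (Int × Int × Int)
  | [], _ => ([], [])
  | e :: es, comp =>
    if comp.getD e.1.toNat 0 ≠ comp.getD e.2.1.toNat 0 then
      (e :: (selB es (comp.map (fun c => if c = comp.getD e.2.1.toNat 0 then comp.getD e.1.toNat 0 else c))).1,
        (selB es (comp.map (fun c => if c = comp.getD e.2.1.toNat 0 then comp.getD e.1.toNat 0 else c))).2)
    else
      ((selB es comp).1, e :: (selB es comp).2)

theorem foldB_eq_selB : ∀ (es : List (Int × Int × Int)) (comp : List Int)
    (tk sk : List (Int × Int × Int)),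
    es.foldl altStep (comp, tk, sk) =
      ((es.foldl altStep (comp, tk, sk)).1, tk ++ (selB es comp).1, sk ++ (selB es comp).2) := by
  intro es
  induction es with
  | nil => intro comp tk sk; simp [selB]
  | cons e es ih =>
    intro comp tk sk
    by_cases hc : comp.getD e.1.toNat 0 ≠ comp.getD e.2.1.toNat 0
    · have hstep : altStep (comp, tk, sk) e =
          (comp.map (fun c => if c = comp.getD e.2.1.toNat 0 then comp.getD e.1.toNat 0 else c),
            tk ++ [e], sk) := by
        rw [altStep, if_pos hc]
      rw [List.foldl_cons, hstep, ih]
      rw [show selB (e :: es) comp =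
        (e :: (selB es (comp.map (fun c => if c = comp.getD e.2.1.toNat 0 then comp.getD e.1.toNat 0 else c))).1,
          (selB es (comp.map (fun c => if c = comp.getD e.2.1.toNat 0 then comp.getD e.1.toNat 0 else c))).2)
        from by rw [selB, if_pos hc]]
      simp
    · have hstep : altStep (comp, tk, sk) e = (comp, tk, sk ++ [e]) := by
        rw [altStep, if_neg hc]
      rw [List.foldl_cons, hstep, ih]
      rw [show selB (e :: es) comp = ((selB es comp).1, e :: (selB es comp).2)
        from by rw [selB, if_neg hc]]
      simp

-- pure logic of merging two classes: relabelling roots A↦B matches relabelling labels b↦a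
theorem mergeIff {ru rv rf rt A B : Nat} {cu cv a b : Int}
    (h1 : ru = rf ↔ cu = a) (h2 : ru = rt ↔ cu = b)
    (h3 : rv = rf ↔ cv = a) (h4 : rv = rt ↔ cv = b)
    (h5 : ru = rv ↔ cu = cv) (hft : rf ≠ rt)
    (hAB : (A = rf ∧ B = rt) ∨ (A = rt ∧ B = rf)) :
    ((if ru = A then B else ru) = (if rv = A then B else rv)) ↔
      ((if cu = b then a else cu) = (if cv = b then a else cv)) := by
  rcases hAB with ⟨hA, hB⟩ | ⟨hA, hB⟩ <;> rw [hA, hB] <;>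
    by_cases x1 : ru = rf <;> by_cases x2 : ru = rt <;>
    by_cases x3 : rv = rf <;> by_cases x4 : rv = rt <;>
    simp_all <;> omega

-- a root-preserving rewrite of the parent list keeps the invariant
theorem KInv_pres {n m : Nat} {p p' : List Nat} {comp : List Int}
    (h : KInv n m p comp) (hlen : p'.length = p.length)
    (hpres : ∀ j u w, rootD j p u = some w → rootD j p' u = some w)
    (hbnd' : ∀ v, v < n → p'.getD v v < n) : KInv n m p' comp := by
  obtain ⟨hplen, hclen, hbnd, hterm, hsim⟩ := h
  refine ⟨hlen.trans hplen, hclen, hbnd', ?_, ?_⟩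
  · intro v hv
    obtain ⟨r, hr⟩ := hterm v hv
    exact ⟨r, hpres m v r hr⟩
  · intro u v ru rv hu hv hru hrv
    obtain ⟨ru0, hru0⟩ := hterm u hu
    obtain ⟨rv0, hrv0⟩ := hterm v hv
    have hru' := hpres m u ru0 hru0
    have hrv' := hpres m v rv0 hrv0
    rw [rootD_unique hru hru', rootD_unique hrv hrv']
    exact hsim u v ru0 rv0 hu hv hru0 hrv0

-- main simulation: A's Kruskal loop returns exactly res ++ B's taken list
theorem simMain (n fuel : Nat) : ∀ (es : List (Int × Int × Int)) (p : List Nat) (rk : List Int)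
    (comp : List Int) (m : Nat) (res : List (Int × Int × Int)),
    m + es.length ≤ fuel → KInv n m p comp →
    (∀ e ∈ es, e.1.toNat < n ∧ e.2.1.toNat < n) →
    kruskalA fuel es p rk res = res ++ (selB es comp).1 := by
  intro es
  induction es with
  | nil => intro p rk comp m res _ _ _; simp [kruskalA, selB]
  | cons e es ih =>
    intro p rk comp m res hfuel hinv hep
    rw [List.length_cons] at hfuel
    obtain ⟨hplen, hclen, hbnd, hterm, hsim⟩ := hinv
    have hf : e.1.toNat < n := (hep e List.mem_cons_self).1
    have ht : e.2.1.toNat < n := (hep e List.mem_cons_self).2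
    have hep' : ∀ x ∈ es, x.1.toNat < n ∧ x.2.1.toNat < n :=
      fun x hx => hep x (List.mem_cons_of_mem e hx)
    obtain ⟨rf, hrf⟩ := hterm _ hf
    obtain ⟨rt, hrt⟩ := hterm _ ht
    have hmf : m ≤ fuel := by omega
    obtain ⟨hf2, hfpres, hflen, hfbnd⟩ := pyFind_spec fuel p e.1.toNat rf (rootD_mono hrf hmf)
    obtain ⟨ht2, htpres, htlen, htbnd⟩ :=
      pyFind_spec fuel (pyFind fuel p e.1.toNat).1 e.2.1.toNat rt
        (hfpres fuel _ rt (rootD_mono hrt hmf))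
    have hstep : kruskalA fuel (e :: es) p rk res =
        (if (pyFind fuel (pyFind fuel p e.1.toNat).1 e.2.1.toNat).2 ≠ (pyFind fuel p e.1.toNat).2 then
          kruskalA fuel es
            (pyUnion fuel (pyFind fuel (pyFind fuel p e.1.toNat).1 e.2.1.toNat).1 rk
              (pyFind fuel (pyFind fuel p e.1.toNat).1 e.2.1.toNat).2 (pyFind fuel p e.1.toNat).2).1
            (pyUnion fuel (pyFind fuel (pyFind fuel p e.1.toNat).1 e.2.1.toNat).1 rk
              (pyFind fuel (pyFind fuel p e.1.toNat).1 e.2.1.toNat).2 (pyFind fuel p e.1.toNat).2).2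
            (res ++ [e])
        else kruskalA fuel es (pyFind fuel (pyFind fuel p e.1.toNat).1 e.2.1.toNat).1 rk res) := rfl
    set p1 := (pyFind fuel p e.1.toNat).1 with hp1
    set p2 := (pyFind fuel p1 e.2.1.toNat).1 with hp2
    rw [hstep, hf2, ht2]
    -- bound transfer
    have hbndp : ∀ v, v < p.length → p.getD v v < p.length := by rw [hplen]; exact hbnd
    have hbnd1 : ∀ v, v < p.length → p1.getD v v < p.length := hfbnd hbndp
    have hbnd2 : ∀ v, v < n → p2.getD v v < n := by
      rw [← hplen]
      intro v hv
      have := htbnd (by rw [hflen]; exact hbnd1) v (by rw [hflen]; exact hv)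
      rw [hflen] at this; exact this
    have hlen2 : p2.length = n := by rw [htlen, hflen, hplen]
    -- both finds preserve all roots
    have hpres12 : ∀ j u w, rootD j p u = some w → rootD j p2 u = some w :=
      fun j u w hw => htpres j u w (hfpres j u w hw)
    -- roots of p2
    have hrfp : p.getD rf rf = rf := rootD_isRoot hrf
    have hrtp : p.getD rt rt = rt := rootD_isRoot hrt
    have hrf2 : rootD 1 p2 rf = some rf := hpres12 1 rf rf (by rw [rootD, if_pos hrfp])
    have hrt2 : rootD 1 p2 rt = some rt := hpres12 1 rt rt (by rw [rootD, if_pos hrtp])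
    have hrep2f : p2.getD rf rf = rf := rootD_isRoot hrf2
    have hrep2t : p2.getD rt rt = rt := rootD_isRoot hrt2
    have hrflt : rf < n := by rw [← hplen]; exact rootD_lt hrf (by rw [hplen]; exact hf) hbndp
    have hrtlt : rt < n := by rw [← hplen]; exact rootD_lt hrt (by rw [hplen]; exact ht) hbndp
    have hsimft := hsim e.2.1.toNat e.1.toNat rt rf ht hf hrt hrf
    by_cases hc : rt ≠ rf
    · -- accepted edge
      have hcc : comp.getD e.1.toNat 0 ≠ comp.getD e.2.1.toNat 0 := by
        intro hcb; exact hc (hsimft.mpr hcb.symm)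
      rw [if_pos hc, selB, if_pos hcc]
      have hUnion : pyUnion fuel p2 rk rt rf =
          (if rt = rf then (p2, rk)
           else if rk.getD rf 0 < rk.getD rt 0 then (p2.set rf rt, rk)
           else (p2.set rt rf, if rk.getD rt 0 = rk.getD rf 0 then rk.set rf (rk.getD rf 0 + 1) else rk)) := by
        simp only [pyUnion, pyFind_root hrep2t, pyFind_root hrep2f]
      -- continuation, uniform in the direction of the link
      have hcont : ∀ (A B : Nat) (rk' : List Int), ((A = rf ∧ B = rt) ∨ (A = rt ∧ B = rf)) →
          kruskalA fuel es (p2.set A B) rk' (res ++ [e]) =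
            res ++ [e] ++ (selB es (comp.map (fun c =>
              if c = comp.getD e.2.1.toNat 0 then comp.getD e.1.toNat 0 else c))).1 := by
        intro A B rk' hABc
        have hA : p2.getD A A = A := by rcases hABc with ⟨h1, _⟩ | ⟨h1, _⟩ <;> subst h1 <;> assumption
        have hB : p2.getD B B = B := by rcases hABc with ⟨_, h1⟩ | ⟨_, h1⟩ <;> subst h1 <;> assumption
        have hABne : A ≠ B := by
          rcases hABc with ⟨h1, h2⟩ | ⟨h1, h2⟩ <;> subst h1 <;> subst h2
          · exact fun x => hc x.symm
          · exact hc
        have hAlt : A < n := by rcases hABc with ⟨h1, _⟩ | ⟨h1, _⟩ <;> subst h1 <;> assumption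
        have hBlt : B < n := by rcases hABc with ⟨_, h1⟩ | ⟨_, h1⟩ <;> subst h1 <;> assumption
        have hlink : ∀ u w, rootD m p2 u = some w →
            rootD (m+1) (p2.set A B) u = some (if w = A then B else w) :=
          fun u w hw => rootD_link hA hB hABne (by rw [hlen2]; exact hAlt) hw
        have hcomp' : ∀ u, u < n → (comp.map (fun c =>
            if c = comp.getD e.2.1.toNat 0 then comp.getD e.1.toNat 0 else c)).getD u 0 =
            (if comp.getD u 0 = comp.getD e.2.1.toNat 0 then comp.getD e.1.toNat 0 else comp.getD u 0) := by
          intro u hu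
          have hu' : u < comp.length := by rw [hclen]; exact hu
          rw [List.getD, List.getElem?_map, List.getElem?_eq_getElem hu']
          simp [List.getD, List.getElem?_eq_getElem hu']
        refine ih (p2.set A B) rk' _ (m+1) (res ++ [e]) (by omega) ⟨?_, ?_, ?_, ?_, ?_⟩ hep'
        · rw [List.length_set, hlen2]
        · rw [List.length_map, hclen]
        · intro v hv
          by_cases hvA : v = A
          · subst hvA
            have : (p2.set v B).getD v v = B := by
              rw [List.getD, List.getElem?_set_self]
              · rfl
              · rw [hlen2]; exact hv
            rw [this]; exact hBlt
          · rw [getD_set_ne' p2 A B v hvA]; exact hbnd2 v hv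
        · intro v hv
          obtain ⟨r, hr⟩ := hterm v hv
          exact ⟨_, hlink v r (hpres12 m v r hr)⟩
        · intro u v ru rv hu hv hru hrv
          obtain ⟨ru0, hru0⟩ := hterm u hu
          obtain ⟨rv0, hrv0⟩ := hterm v hv
          have hru' := hlink u ru0 (hpres12 m u ru0 hru0)
          have hrv' := hlink v rv0 (hpres12 m v rv0 hrv0)
          rw [rootD_unique hru hru', rootD_unique hrv hrv']
          rw [hcomp' u hu, hcomp' v hv]
          exact mergeIff
            (hsim u e.1.toNat ru0 rf hu hf hru0 hrf)
            (hsim u e.2.1.toNat ru0 rt hu ht hru0 hrt)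
            (hsim v e.1.toNat rv0 rf hv hf hrv0 hrf)
            (hsim v e.2.1.toNat rv0 rt hv ht hrv0 hrt)
            (hsim u v ru0 rv0 hu hv hru0 hrv0)
            (fun x => hc (x.symm ▸ rfl) )
            hABc
      rw [hUnion, if_neg (by simpa using hc)]
      by_cases hrk : rk.getD rf 0 < rk.getD rt 0
      · rw [if_pos hrk]
        rw [hcont rf rt rk (Or.inl ⟨rfl, rfl⟩)]
        simp
      · rw [if_neg hrk]
        rw [hcont rt rf _ (Or.inr ⟨rfl, rfl⟩)]
        simp
    · -- skipped edge
      have hcb : comp.getD e.1.toNat 0 = comp.getD e.2.1.toNat 0 := by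
        have : rt = rf := by simpa using hc
        exact (hsimft.mp this).symm
      rw [if_neg hc, selB, if_neg (by simpa using hcb)]
      exact ih p2 rk comp m res (by omega)
        (KInv_pres ⟨hplen, hclen, hbnd, hterm, hsim⟩ (by rw [hlen2, hplen]) hpres12 hbnd2) hep'

-- the "first K[j] not in result" scan only ever stops on skipped edges
theorem find?_selB : ∀ (es : List (Int × Int × Int)) (comp : List Int)
    (P : (Int × Int × Int) → Bool),
    (∀ e ∈ (selB es comp).1, P e = false) →
    es.find? P = (selB es comp).2.find? P := by
  intro es
  induction es with
  | nil => intro comp P _; simp [selB]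
  | cons e es ih =>
    intro comp P hP
    by_cases hc : comp.getD e.1.toNat 0 ≠ comp.getD e.2.1.toNat 0
    · have hsel : selB (e :: es) comp =
          (e :: (selB es (comp.map (fun c => if c = comp.getD e.2.1.toNat 0 then comp.getD e.1.toNat 0 else c))).1,
            (selB es (comp.map (fun c => if c = comp.getD e.2.1.toNat 0 then comp.getD e.1.toNat 0 else c))).2) := by
        rw [selB, if_pos hc]
      rw [hsel] at hP ⊢
      have hPe : P e = false := hP e (by simp)
      rw [List.find?_cons, hPe]
      exact ih _ P (fun x hx => hP x (List.mem_cons_of_mem e hx))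
    · have hsel : selB (e :: es) comp = ((selB es comp).1, e :: (selB es comp).2) := by
        rw [selB, if_neg hc]
      rw [hsel] at hP ⊢
      rw [List.find?_cons, List.find?_cons]
      cases hPe : P e with
      | true => rfl
      | false => exact ih _ P hP

theorem KInv_init (n : Nat) : KInv n 1 (List.range n) ((List.range n).map (fun (v : Nat) => (v : Int))) := by
  refine ⟨List.length_range, by simp, ?_, ?_, ?_⟩
  · intro v hv
    simp [List.getD, hv]
  · intro v hv
    exact ⟨v, by rw [rootD]; simp [List.getD, hv]⟩
  · intro u v ru rv hu hv hru hrv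
    have h1 : (List.range n).getD u u = u := by simp [List.getD, hu]
    have h2 : (List.range n).getD v v = v := by simp [List.getD, hv]
    rw [rootD, if_pos h1] at hru
    rw [rootD, if_pos h2] at hrv
    cases hru; cases hrv
    have g1 : ((List.range n).map (fun (v : Nat) => (v : Int))).getD u 0 = (u : Int) := by
      rw [List.getD_eq_getElem _ _ (by simpa using hu), List.getElem_map, List.getElem_range]
    have g2 : ((List.range n).map (fun (v : Nat) => (v : Int))).getD v 0 = (v : Int) := by
      rw [List.getD_eq_getElem _ _ (by simpa using hv), List.getElem_map, List.getElem_range]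
    rw [g1, g2]
    exact ⟨fun h => by exact_mod_cast congrArg (fun (x : Nat) => (x : Int)) h,
      fun h => by exact_mod_cast h⟩

-- membership in the inner edge-building fold
theorem memInner : ∀ (adj : List (Int × Int)) (i : Int) (acc : Int × List (Int × Int × Int)) e,
    e ∈ (adj.foldl (fun acc2 tw =>
      if i < tw.1 then (acc2.1 + tw.2, acc2.2 ++ [(i, tw.1, -tw.2)]) else acc2) acc).2 →
    e ∈ acc.2 ∨ ∃ tw ∈ adj, i < tw.1 ∧ e = (i, tw.1, -tw.2) := by
  intro adj
  induction adj with
  | nil => intro i acc e h; exact Or.inl h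
  | cons tw adj ih =>
    intro i acc e h
    rw [List.foldl_cons] at h
    by_cases hc : i < tw.1
    · rw [if_pos hc] at h
      rcases ih i _ e h with hin | ⟨tw', htw', h1, h2⟩
      · rcases List.mem_append.mp hin with h1 | h1
        · exact Or.inl h1
        · exact Or.inr ⟨tw, List.mem_cons_self, hc, by simpa using h1⟩
      · exact Or.inr ⟨tw', List.mem_cons_of_mem tw htw', h1, h2⟩
    · rw [if_neg hc] at h
      rcases ih i _ e h with hin | ⟨tw', htw', h1, h2⟩
      · exact Or.inl hin
      · exact Or.inr ⟨tw', List.mem_cons_of_mem tw htw', h1, h2⟩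

-- membership in the outer edge-building fold
theorem memBuild : ∀ (l : List (Int × List (Int × Int))) (acc : Int × List (Int × Int × Int)) e,
    e ∈ (l.foldl (fun acc ia => ia.2.foldl (fun acc2 tw =>
      if ia.1 < tw.1 then (acc2.1 + tw.2, acc2.2 ++ [(ia.1, tw.1, -tw.2)]) else acc2) acc) acc).2 →
    e ∈ acc.2 ∨ ∃ ia ∈ l, ∃ tw ∈ ia.2, ia.1 < tw.1 ∧ e = (ia.1, tw.1, -tw.2) := by
  intro l
  induction l with
  | nil => intro acc e h; exact Or.inl h
  | cons ia l ih =>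
    intro acc e h
    rw [List.foldl_cons] at h
    rcases ih _ e h with hin | ⟨ia', hia', tw, htw, h1, h2⟩
    · rcases memInner ia.2 ia.1 acc e hin with h1 | ⟨tw, htw, h1, h2⟩
      · exact Or.inl h1
      · exact Or.inr ⟨ia, List.mem_cons_self, tw, htw, h1, h2⟩
    · exact Or.inr ⟨ia', List.mem_cons_of_mem ia hia', tw, htw, h1, h2⟩

-- the whole pipeline after the edge list is built, A-shape = B-shape
theorem coreEq (n : Nat) (M : Int) (K0 : List (Int × Int × Int)) (hn : 1 ≤ n)
    (hK : ∀ e ∈ K0, e.1.toNat < n ∧ e.2.1.toNat < n) :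
    (M - (((PySem.List.sorted K0 (fun x => x.2.2) false).find? (fun e => !((kruskalA (n + (PySem.List.sorted K0 (fun x => x.2.2) false).length) (PySem.List.sorted K0 (fun x => x.2.2) false) (List.range n) (List.replicate n (0 : Int)) []).contains e))).elim (kruskalA (n + (PySem.List.sorted K0 (fun x => x.2.2) false).length) (PySem.List.sorted K0 (fun x => x.2.2) false) (List.range n) (List.replicate n (0 : Int)) []) (fun e => (kruskalA (n + (PySem.List.sorted K0 (fun x => x.2.2) false).length) (PySem.List.sorted K0 (fun x => x.2.2) false) (List.range n) (List.replicate n (0 : Int)) []) ++ [e])).foldl (fun s e => s - e.2.2) (0 : Int))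
    = (M - (((PySem.List.sorted K0 (fun x => x.2.2) false).foldl altStep ((List.range n).map (fun (v : Nat) => (v : Int)), [], [])).2.2.find? (fun e => !(((PySem.List.sorted K0 (fun x => x.2.2) false).foldl altStep ((List.range n).map (fun (v : Nat) => (v : Int)), [], [])).2.1.contains e))).elim (((PySem.List.sorted K0 (fun x => x.2.2) false).foldl altStep ((List.range n).map (fun (v : Nat) => (v : Int)), [], [])).2.1.foldl (fun s e => s - e.2.2) (0 : Int)) (fun e => (((PySem.List.sorted K0 (fun x => x.2.2) false).foldl altStep ((List.range n).map (fun (v : Nat) => (v : Int)), [], [])).2.1.foldl (fun s e => s - e.2.2) (0 : Int)) - e.2.2)) := by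
  set K := PySem.List.sorted K0 (fun x => x.2.2) false with hKdef
  set comp0 := (List.range n).map (fun (v : Nat) => (v : Int)) with hc0
  have hK' : ∀ e ∈ K, e.1.toNat < n ∧ e.2.1.toNat < n := by
    intro e he
    exact hK e ((PySem.List.mem_sorted K0 _ false e).mp he)
  have hres : kruskalA (n + K.length) K (List.range n) (List.replicate n (0 : Int)) []
      = (selB K comp0).1 := by
    have := simMain n (n + K.length) K (List.range n) (List.replicate n (0 : Int)) comp0 1 []
      (by omega) (KInv_init n) hK'
    simpa using this
  have hst : K.foldl altStep (comp0, [], []) =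
      ((K.foldl altStep (comp0, [], [])).1, (selB K comp0).1, (selB K comp0).2) := by
    simpa using foldB_eq_selB K comp0 [] []
  rw [hres, hst]
  have hfind : K.find? (fun e => !((selB K comp0).1.contains e)) =
      (selB K comp0).2.find? (fun e => !((selB K comp0).1.contains e)) := by
    apply find?_selB
    intro e he
    simp [he]
  rw [hfind]
  cases hx : (selB K comp0).2.find? (fun e => !((selB K comp0).1.contains e)) with
  | none => rfl
  | some x =>
    simp only [Option.elim, List.foldl_append, List.foldl_cons, List.foldl_nil]

theorem buildEq (G : List (List (Int × Int))) :
    (PySem.List.pyRange 0 (G.length : Int) 1).foldl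
      (fun acc i =>
        (PySem.List.pyRange 0 ((PySem.List.pyGetD G i []).length : Int) 1).foldl
          (fun acc2 j =>
            if i < (PySem.List.pyGetD (PySem.List.pyGetD G i []) j ((0 : Int), (0 : Int))).1 then
              (acc2.1 + (PySem.List.pyGetD (PySem.List.pyGetD G i []) j ((0 : Int), (0 : Int))).2,
                acc2.2 ++ [(i, (PySem.List.pyGetD (PySem.List.pyGetD G i []) j ((0 : Int), (0 : Int))).1,
                  -(PySem.List.pyGetD (PySem.List.pyGetD G i []) j ((0 : Int), (0 : Int))).2)])
            else acc2) acc)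
      ((0 : Int), ([] : List (Int × Int × Int)))
    = (PySem.List.enumerate G 0).foldl
        (fun acc ia => ia.2.foldl
          (fun acc2 tw =>
            if ia.1 < tw.1 then (acc2.1 + tw.2, acc2.2 ++ [(ia.1, tw.1, -tw.2)]) else acc2) acc)
        ((0 : Int), ([] : List (Int × Int × Int))) := by
  rw [show PySem.List.enumerate G 0 = (PySem.List.pyRange 0 (PySem.List.len G) 1).map
      (fun j => (j, PySem.List.pyGetD G j [])) from PySem.List.enumerate_eq_map_pyRange G []]
  rw [List.foldl_map]
  apply PySem.List.foldl_congr_mem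
  intro acc i _
  exact PySem.List.foldl_pyRange_pyGetD' (PySem.List.pyGetD G i []) ((0 : Int), (0 : Int))
    (fun acc2 tw => if i < tw.1 then (acc2.1 + tw.2, acc2.2 ++ [(i, tw.1, -tw.2)]) else acc2)
    acc (le_refl 0)

theorem lufthansa_spec' : ∀ (G : List (List (Int × Int))), Pre_lufthansa G →
    lufthansa G = lufthansa_alt G := by
  intro G hpre
  rcases Nat.eq_zero_or_pos G.length with hn | hn
  · have : G = [] := List.eq_nil_of_length_eq_zero hn
    subst this
    decide
  · show lufthansa G = lufthansa_alt G
    rw [lufthansa, lufthansa_alt]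
    simp only []
    rw [buildEq G]
    apply coreEq G.length _ _ hn
    intro e he
    rcases memBuild (PySem.List.enumerate G 0) ((0 : Int), []) e he with h | ⟨ia, hia, tw, htw, hlt, hee⟩
    · simp at h
    · obtain ⟨k, hk, hiak⟩ := (PySem.List.mem_enumerate_iff G 0 ia).mp hia
      have hia1 : ia.1 = (k : Int) := by rw [hiak]; simp
      have ht : tw.1 < (G.length : Int) := hpre ia hia tw htw hlt
      subst hee
      constructor
      · show ia.1.toNat < G.length
        rw [hia1]
        simpa using hk
      · show tw.1.toNat < G.length
        have h0 : (0 : Int) ≤ tw.1 := le_of_lt (lt_of_le_of_lt (by simp [hia1]) hlt)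
        omega

-- ===== VERDICT (by name: the statement is the Claim_ definition above) =====
theorem lufthansa_spec : Claim_equal_lufthansa := by
  intro G _ hpre
  exact lufthansa_spec' G hpre
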